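-- pv_equiv track=rewrite | github.com/kw-pp/algorithm_Study | doyeon/BOJ/브루트 포스/20210411_boj_12100(2).py | convert
-- ===== SOURCE A (Python) =====
-- def convert(N, B):
--     new_lst = [i for i in B if i!=0]    #0을 제외한 list저장
--     for i in range(1, len(new_lst)):
--         if new_lst[i-1] == new_lst[i]:
--             new_lst[i-1] *= 2
--             new_lst[i] = 0
--     new_lst = [i for i in new_lst if i!=0]
--     return new_lst + [0]*(N-len(new_lst))    #list길이만큼 오른쪽에 0추가
-- ===== SOURCE B (Python) =====
-- def convert(N, B):
--     ts = [t for t in B if t != 0]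
--     res = []
--     i = 0
--     while i < len(ts):
--         if i + 1 < len(ts) and ts[i] == ts[i + 1]:
--             res.append(2 * ts[i])
--             i += 2
--         else:
--             res.append(ts[i])
--             i += 1
--     return res + [0] * (N - len(res))
-- ===== Notes on version B (the rewrite author's own statement) =====
-- stated objective: idiomatic
-- what changed: A marks merged tiles with 0 in-place via an index loop over the list and re-filters; B consumes the nonzero tile list from the front in one accumulating pass (take two equal tiles as their doubled merge, else one tile), with no zero-marking and no second filter pass.
import Mathlib
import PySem

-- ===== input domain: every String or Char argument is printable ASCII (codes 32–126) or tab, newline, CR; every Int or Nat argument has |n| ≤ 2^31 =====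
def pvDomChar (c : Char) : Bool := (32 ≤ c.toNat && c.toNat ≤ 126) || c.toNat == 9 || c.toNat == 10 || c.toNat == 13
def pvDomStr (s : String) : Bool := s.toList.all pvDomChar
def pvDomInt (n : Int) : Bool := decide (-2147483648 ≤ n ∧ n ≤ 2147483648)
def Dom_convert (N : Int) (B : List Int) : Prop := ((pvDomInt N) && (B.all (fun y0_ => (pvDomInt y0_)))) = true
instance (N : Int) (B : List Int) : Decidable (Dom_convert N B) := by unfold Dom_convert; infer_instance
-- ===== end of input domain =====

-- B replaces A's in-place zero-marking index loop plus second filter by a direct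
-- structural recursion merging the nonzero tiles pairwise (objective: idiomatic).

-- ===== PORT A =====
-- body of A's `for i in range(1, len(new_lst))` loop (reads before writes, as in Python)
def convertStep (lst : List Int) (i : Int) : List Int :=
  if PySem.List.pyGetD lst (i - 1) 0 == PySem.List.pyGetD lst i 0 then
    PySem.List.pySetD (PySem.List.pySetD lst (i - 1) (PySem.List.pyGetD lst (i - 1) 0 * 2)) i 0
  else lst

def convert (N : Int) (B : List Int) : List Int :=
  let nl1 := B.filter (fun i => i != 0)
  let nl2 := (PySem.List.pyRange 1 (nl1.length : Int) 1).foldl convertStep nl1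
  let nl3 := nl2.filter (fun i => i != 0)
  nl3 ++ List.replicate ((N - (nl3.length : Int)).toNat) 0

-- ===== PORT B =====
-- B consumes the nonzero-tile list from the front (two equal tiles, or one): the while
-- loop over the remaining suffix is transcribed as structural recursion on that suffix.
def mergeB : List Int → List Int
  | [] => []
  | [a] => [a]
  | a :: b :: t => if a == b then 2 * a :: mergeB t else a :: mergeB (b :: t)

def convert_alt (N : Int) (B : List Int) : List Int :=
  let res := mergeB (B.filter (fun t => t != 0))
  res ++ List.replicate ((N - (res.length : Int)).toNat) 0

-- ===== PRECONDITION & SPEC =====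
def Spec_convert (N : Int) (B : List Int) (out : List Int) : Prop := out = convert_alt N B
instance (N : Int) (B : List Int) (out : List Int) : Decidable (Spec_convert N B out) := by unfold Spec_convert; infer_instance

-- ===== CLAIM (what is proved, stated in full; the proofs are below) =====
def Claim_equal_convert : Prop := ∀ (N : Int) (B : List Int), Dom_convert N B → Spec_convert N B (convert N B)

-- ===== LEMMAS AND PROOFS =====

-- proof-side characterisation of A's loop: `pass2 a xs` is what the loop leaves in the
-- list from the cell holding `a` onwards, when every element of `xs` is nonzero.
def pass2 : Int → List Int → List Int
  | a, [] => [a]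
  | a, b :: t => if a = b then a * 2 :: pass2 0 t else a :: pass2 b t

lemma pyGetD_append_cons (u ys : List Int) (a d : Int) :
    PySem.List.pyGetD (u ++ a :: ys) (u.length : Int) d = a := by
  simp [PySem.List.pyGetD_natCast, List.getD]

lemma pyGetD_append_cons1 (u ys : List Int) (a b d : Int) :
    PySem.List.pyGetD (u ++ a :: b :: ys) ((u.length : Int) + 1) d = b := by
  have : ((u.length : Int) + 1) = ((u.length + 1 : Nat) : Int) := by push_cast; ring
  rw [this, PySem.List.pyGetD_natCast]
  simp [List.getD]

lemma pySetD_append_cons (u ys : List Int) (a v : Int) :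
    PySem.List.pySetD (u ++ a :: ys) (u.length : Int) v = u ++ v :: ys := by
  rw [PySem.List.pySetD_natCast]
  simp

lemma pySetD_append_cons1 (u ys : List Int) (a b v : Int) :
    PySem.List.pySetD (u ++ a :: b :: ys) ((u.length : Int) + 1) v = u ++ a :: v :: ys := by
  have : ((u.length : Int) + 1) = ((u.length + 1 : Nat) : Int) := by push_cast; ring
  rw [this, PySem.List.pySetD_natCast]
  simp

lemma loop_spec (xs : List Int) : ∀ (u : List Int) (a : Int),
    (PySem.List.pyRange ((u.length : Int) + 1) ((u.length : Int) + 1 + xs.length) 1).foldl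
        convertStep (u ++ a :: xs)
      = u ++ pass2 a xs := by
  induction xs with
  | nil =>
    intro u a
    rw [PySem.List.pyRange_one_eq_nil (by simp)]
    simp [pass2]
  | cons b t ih =>
    intro u a
    rw [PySem.List.pyRange_one_cons (by simp only [List.length_cons]; push_cast; omega)]
    have hstep : convertStep (u ++ a :: b :: t) ((u.length : Int) + 1)
        = if a = b then u ++ a * 2 :: 0 :: t else u ++ a :: b :: t := by
      unfold convertStep
      have h1 : ((u.length : Int) + 1 - 1) = (u.length : Int) := by ring
      rw [h1, pyGetD_append_cons, pyGetD_append_cons1]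
      by_cases hab : a = b
      · simp only [hab, beq_self_eq_true, if_true]
        rw [pySetD_append_cons, pySetD_append_cons1]
      · simp [hab]
    rw [List.foldl_cons, hstep]
    by_cases hab : a = b
    · rw [if_pos hab]
      have h2 : u ++ a * 2 :: 0 :: t = (u ++ [a * 2]) ++ (0 : Int) :: t := by simp
      have hlen : ((u.length : Int) + 1 + 1) = (((u ++ [a * 2]).length : Int) + 1) := by
        simp only [List.length_append, List.length_cons, List.length_nil]; push_cast; ring
      have hlen2 : ((u.length : Int) + 1 + ((b :: t).length : Int))
          = (((u ++ [a * 2]).length : Int) + 1 + (t.length : Int)) := by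
        simp only [List.length_append, List.length_cons, List.length_nil]; push_cast; ring
      rw [h2, hlen, hlen2, ih (u ++ [a * 2]) 0]
      simp [pass2, hab]
    · rw [if_neg hab]
      have h2 : u ++ a :: b :: t = (u ++ [a]) ++ b :: t := by simp
      have hlen : ((u.length : Int) + 1 + 1) = (((u ++ [a]).length : Int) + 1) := by
        simp only [List.length_append, List.length_cons, List.length_nil]; push_cast; ring
      have hlen2 : ((u.length : Int) + 1 + ((b :: t).length : Int))
          = (((u ++ [a]).length : Int) + 1 + (t.length : Int)) := by
        simp only [List.length_append, List.length_cons, List.length_nil]; push_cast; ring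
      rw [h2, hlen, hlen2, ih (u ++ [a]) b]
      simp [pass2, hab]

lemma filter_pass2 (xs : List Int) (hxs : ∀ x ∈ xs, x ≠ 0) :
    (∀ a, a ≠ 0 → (pass2 a xs).filter (fun i => i != 0) = mergeB (a :: xs)) ∧
      (pass2 0 xs).filter (fun i => i != 0) = mergeB xs := by
  induction xs with
  | nil =>
    constructor
    · intro a ha; simp [pass2, mergeB, ha]
    · simp [pass2, mergeB]
  | cons b t ih =>
    have hb : b ≠ 0 := hxs b (by simp)
    have ht : ∀ x ∈ t, x ≠ 0 := fun x hx => hxs x (by simp [hx])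
    obtain ⟨ih1, ih2⟩ := ih ht
    constructor
    · intro a ha
      by_cases hab : a = b
      · subst hab
        have ha2 : (a * 2 != 0) = true := by simp only [bne_iff_ne, ne_eq]; omega
        simp only [pass2, mergeB, beq_self_eq_true, if_true]
        rw [List.filter_cons, if_pos ha2, ih2]
        congr 1
        ring
      · simp only [pass2, if_neg hab, mergeB]
        have : (a == b) = false := by simp [hab]
        rw [this]
        simp only [Bool.false_eq_true, if_false]
        rw [List.filter_cons]
        simp only [ha, bne_iff_ne, ne_eq, not_false_eq_true, decide_true, if_true]
        rw [ih1 b hb]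
    · have h0b : (0 : Int) ≠ b := fun h => hb h.symm
      simp only [pass2, if_neg h0b]
      rw [List.filter_cons]
      simp only [bne_self_eq_false, if_false, Bool.false_eq_true]
      rw [ih1 b hb]

lemma loop_filter (xs : List Int) (hxs : ∀ x ∈ xs, x ≠ 0) :
    ((PySem.List.pyRange 1 (xs.length : Int) 1).foldl convertStep xs).filter (fun i => i != 0)
      = mergeB xs := by
  cases xs with
  | nil => simp [PySem.List.pyRange, mergeB]
  | cons a t =>
    have ha : a ≠ 0 := hxs a (by simp)
    have ht : ∀ x ∈ t, x ≠ 0 := fun x hx => hxs x (by simp [hx])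
    have key := loop_spec t [] a
    simp only [List.length_nil, Nat.cast_zero, zero_add, List.nil_append] at key
    have hl : ((a :: t).length : Int) = 1 + (t.length : Int) := by
      simp only [List.length_cons]; push_cast; ring
    rw [hl, key]
    simpa using (filter_pass2 t ht).1 a ha

-- ===== VERDICT (by name: the statement is the Claim_ definition above) =====
theorem convert_spec : Claim_equal_convert := by
  intro N B _
  unfold Spec_convert convert convert_alt
  have hxs : ∀ x ∈ B.filter (fun i => i != 0), x ≠ 0 := by
    intro x hx
    simpa using (List.mem_filter.mp hx).2
  have hf : (B.filter (fun i => i != 0)) = (B.filter (fun t => t != 0)) := rfl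
  simp only []
  rw [loop_filter (B.filter (fun i => i != 0)) hxs, hf]
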